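-- pv_equiv track=rewrite | github.com/PolycarpusTack/tuokit | utils/model_manager.py | get_preferred_model
-- ===== SOURCE A (Python) =====
-- from typing import List, Optional, Dict, Any
--
-- def get_preferred_model(available_models: List[str],
--                       preferred_keywords: List[str] = None) -> str:
--     """
--     Get the best available model based on preferences
--
--     Args:
--         available_models: List of available models
--         preferred_keywords: Keywords to prefer (default: common good models)
--
--     Returns:
--         Best available model or first model in list
--     """
--     if not available_models:
--         return None
--
--     if preferred_keywords is None:
--         # Default preferences based on quality and speed
--         preferred_keywords = ["deepseek-r1", "deepseek-coder", "llama", "mistral", "gpt"]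
--
--     # Try to find a preferred model
--     for keyword in preferred_keywords:
--         for model in available_models:
--             if keyword in model.lower():
--                 return model
--
--     # Return first available if no preference matches
--     return available_models[0]
-- ===== SOURCE B (Python) =====
-- def get_preferred_model(available_models, preferred_keywords=None):
--     if not available_models:
--         return None
--     if preferred_keywords is None:
--         preferred_keywords = ["deepseek-r1", "deepseek-coder", "llama", "mistral", "gpt"]
--
--     n = len(preferred_keywords)
--     best, best_score = None, n + 1
--     for model in available_models:
--         ml = model.lower()
--         score = next((i for i, kw in enumerate(preferred_keywords) if kw in ml), n)
--         if score < best_score: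
--             best, best_score = model, score
--             if best_score == 0:
--                 break
--     return best
-- ===== Notes on version B (the rewrite author's own statement) =====
-- stated objective: alternative
-- what changed: Replaces A's keyword-major nested scan with a single model-major pass that keeps the first model minimizing the index of its first matching keyword (len if none), exiting early on an index-0 match.
import Mathlib
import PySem

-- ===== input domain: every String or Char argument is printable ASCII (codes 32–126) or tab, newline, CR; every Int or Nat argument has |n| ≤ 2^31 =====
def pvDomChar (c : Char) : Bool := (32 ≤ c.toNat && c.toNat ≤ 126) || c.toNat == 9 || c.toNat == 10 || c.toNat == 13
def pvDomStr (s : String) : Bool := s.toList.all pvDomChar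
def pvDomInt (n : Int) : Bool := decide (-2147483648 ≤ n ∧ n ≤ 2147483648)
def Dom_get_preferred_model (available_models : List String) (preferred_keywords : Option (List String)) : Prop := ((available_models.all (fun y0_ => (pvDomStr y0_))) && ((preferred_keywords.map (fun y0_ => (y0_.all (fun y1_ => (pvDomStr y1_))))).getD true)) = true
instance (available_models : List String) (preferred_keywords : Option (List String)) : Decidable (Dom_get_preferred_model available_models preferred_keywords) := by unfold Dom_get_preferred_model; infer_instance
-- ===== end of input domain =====

-- B replaces A's keyword-major nested scan with one model-major pass keeping the first model
-- of minimal first-matching-keyword index (an alternative decomposition, same cost).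

-- ===== PORT A =====
-- outer 'for keyword in preferred_keywords' loop; the inner 'for model in …: if …: return model'
-- is exactly List.find?
def pvLoopA (available_models : List String) : List String → Option String
  | [] => none
  | kw :: rest =>
    match available_models.find? (fun m => PySem.Str.isIn kw (PySem.Str.lower m)) with
    | some m => some m
    | none => pvLoopA available_models rest

def get_preferred_model (available_models : List String) (preferred_keywords : Option (List String)) : Option String :=
  if available_models.isEmpty then none
  else
    let kws := preferred_keywords.getD ["deepseek-r1", "deepseek-coder", "llama", "mistral", "gpt"]
    match pvLoopA available_models kws with
    | some m => some m
    | none => available_models.head?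

-- ===== PORT B =====
-- score(model): index of the first keyword contained in model.lower(), or len(keywords)
def pvScore : List String → String → Nat
  | [], _ => 0
  | kw :: rest, ml => if PySem.Str.isIn kw ml then 0 else 1 + pvScore rest ml

-- the single forward pass: keep the first model with the smallest score, stop early on score 0
def pvPick (key : String → Nat) : List String → Option String → Nat → Option String
  | [], best, _ => best
  | m :: rest, best, bs =>
    let s := key m
    if s < bs then
      if s = 0 then some m else pvPick key rest (some m) s
    else pvPick key rest best bs

def get_preferred_model_alt (available_models : List String) (preferred_keywords : Option (List String)) : Option String :=
  if available_models.isEmpty then none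
  else
    let kws := preferred_keywords.getD ["deepseek-r1", "deepseek-coder", "llama", "mistral", "gpt"]
    pvPick (fun m => pvScore kws (PySem.Str.lower m)) available_models none (kws.length + 1)

-- ===== PRECONDITION & SPEC =====
def Spec_get_preferred_model (available_models : List String) (preferred_keywords : Option (List String)) (out : Option String) : Prop := out = get_preferred_model_alt available_models preferred_keywords
instance (available_models : List String) (preferred_keywords : Option (List String)) (out : Option String) : Decidable (Spec_get_preferred_model available_models preferred_keywords out) := by unfold Spec_get_preferred_model; infer_instance

-- ===== CLAIM (what is proved, stated in full; the proofs are below) =====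
def Claim_equal_get_preferred_model : Prop := ∀ (available_models : List String) (preferred_keywords : Option (List String)), Dom_get_preferred_model available_models preferred_keywords → Spec_get_preferred_model available_models preferred_keywords (get_preferred_model available_models preferred_keywords)

-- ===== LEMMAS AND PROOFS =====

-- the running accumulator of min?'s fold, spelled out
def pvStep (key : String → Nat) (acc : Option String) (x : String) : Option String :=
  match acc with
  | none => some x
  | some m => if key x < key m then some x else some m

theorem min?_eq_foldl_pvStep (key : String → Nat) (xs : List String) :
    PySem.List.min? xs key = xs.foldl (pvStep key) none := by
  simp only [PySem.List.min?]
  congr 1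
  funext acc x
  cases acc <;> simp [pvStep]

-- a zero-key accumulator is never replaced (Nat keys)
theorem foldl_pvStep_keep (key : String → Nat) (t : List String) (m : String) (hm : key m = 0) :
    t.foldl (pvStep key) (some m) = some m := by
  induction t with
  | nil => rfl
  | cons y s ih => simp [pvStep, hm, ih]

-- with no zero-key element yet in the accumulator, the fold lands on the first zero-key element
theorem foldl_pvStep_first_zero (key : String → Nat) :
    ∀ (xs : List String) (a : String), key a ≠ 0 →
    ∀ m, xs.find? (fun x => key x == 0) = some m →
    xs.foldl (pvStep key) (some a) = some m := by
  intro xs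
  induction xs with
  | nil => intro a _ m h; simp at h
  | cons y s ih =>
    intro a ha m h
    by_cases hy : key y = 0
    · have hm : m = y := by
        rw [List.find?_cons, show (key y == 0) = true by simpa using hy] at h
        exact (Option.some.inj h).symm
      subst hm
      have hlt : key m < key a := by omega
      simp [List.foldl_cons, pvStep, hlt, foldl_pvStep_keep key s m hy]
    · have hfind : s.find? (fun x => key x == 0) = some m := by
        rwa [List.find?_cons, show (key y == 0) = false by simpa using hy] at h
      simp only [List.foldl_cons]
      by_cases hlt : key y < key a
      · rw [show pvStep key (some a) y = some y by simp [pvStep, hlt]]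
        exact ih y hy m hfind
      · rw [show pvStep key (some a) y = some a by simp [pvStep, hlt]]
        exact ih a ha m hfind

-- min? returns the first element whose Nat key is 0, if any
theorem min?_first_zero (key : String → Nat) (xs : List String) (m : String)
    (h : xs.find? (fun x => key x == 0) = some m) :
    PySem.List.min? xs key = some m := by
  cases xs with
  | nil => simp at h
  | cons x t =>
    rw [min?_eq_foldl_pvStep]
    simp only [List.foldl_cons, pvStep]
    by_cases hx : key x = 0
    · have hm : m = x := by
        rw [List.find?_cons, show (key x == 0) = true by simpa using hx] at h
        exact (Option.some.inj h).symm
      subst hm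
      exact foldl_pvStep_keep key t m hx
    · have hfind : t.find? (fun x => key x == 0) = some m := by
        rwa [List.find?_cons, show (key x == 0) = false by simpa using hx] at h
      exact foldl_pvStep_first_zero key t x hx m hfind

-- keys equal on the list and on the accumulator give the same fold
theorem foldl_pvStep_congr (k1 k2 : String → Nat) :
    ∀ (xs : List String) (acc : Option String),
    (∀ x ∈ xs, k1 x = k2 x) → (∀ a, acc = some a → k1 a = k2 a) →
    xs.foldl (pvStep k1) acc = xs.foldl (pvStep k2) acc := by
  intro xs
  induction xs with
  | nil => intro _ _ _; rfl
  | cons y s ih =>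
    intro acc hxs hacc
    have hy : k1 y = k2 y := hxs y (by simp)
    have hstep : pvStep k1 acc y = pvStep k2 acc y := by
      cases acc with
      | none => rfl
      | some a => simp [pvStep, hy, hacc a rfl]
    simp only [List.foldl_cons, hstep]
    refine ih _ (fun x hx => hxs x (by simp [hx])) ?_
    intro a ha
    cases acc with
    | none => simp [pvStep] at ha; subst ha; exact hy
    | some b =>
      simp only [pvStep] at ha
      split at ha
      · cases ha; exact hy
      · cases ha; exact hacc _ rfl

theorem min?_congr_mem (k1 k2 : String → Nat) (xs : List String)
    (h : ∀ x ∈ xs, k1 x = k2 x) :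
    PySem.List.min? xs k1 = PySem.List.min? xs k2 := by
  rw [min?_eq_foldl_pvStep, min?_eq_foldl_pvStep]
  exact foldl_pvStep_congr k1 k2 xs none h (by intro a h; cases h)

-- shifting every key by 1 does not change the chosen element
theorem min?_shift (f : String → Nat) (xs : List String) :
    PySem.List.min? xs (fun x => 1 + f x) = PySem.List.min? xs f := by
  rw [min?_eq_foldl_pvStep, min?_eq_foldl_pvStep]
  have : pvStep (fun x => 1 + f x) = pvStep f := by
    funext acc x; cases acc <;> simp [pvStep]
  rw [this]

-- a constant key selects the head
theorem min?_const_zero (xs : List String) :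
    PySem.List.min? xs (fun _ => (0 : Nat)) = xs.head? := by
  cases xs with
  | nil => rfl
  | cons x t =>
    rw [min?_eq_foldl_pvStep]
    simp only [List.foldl_cons, pvStep]
    rw [foldl_pvStep_keep (fun _ => 0) t x rfl]; rfl

-- 'score = 0' is exactly 'the head keyword matches'
theorem score_cons_zero_iff (kw : String) (rest : List String) (m : String) :
    ((pvScore (kw :: rest) (PySem.Str.lower m) == 0) : Bool)
      = PySem.Str.isIn kw (PySem.Str.lower m) := by
  cases h : PySem.Str.isIn kw (PySem.Str.lower m) with
  | true => simp [pvScore, h]; simpa using h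
  | false => simp [pvScore, h, Nat.add_comm]; simpa using h

-- the score never exceeds the number of keywords
theorem pvScore_le (kws : List String) (ml : String) : pvScore kws ml ≤ kws.length := by
  induction kws with
  | nil => simp [pvScore]
  | cons kw rest ih =>
    simp only [pvScore, List.length_cons]
    split <;> omega

-- once an element is held, the early-exit pass agrees with min?'s fold
theorem pvPick_eq_foldl (key : String → Nat) :
    ∀ (xs : List String) (m : String),
    pvPick key xs (some m) (key m) = xs.foldl (pvStep key) (some m) := by
  intro xs
  induction xs with
  | nil => intro m; rfl
  | cons x t ih =>
    intro m
    by_cases hlt : key x < key m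
    · by_cases hz : key x = 0
      · have h0 : 0 < key m := hz ▸ hlt
        simp [pvPick, hz, h0, List.foldl_cons, pvStep,
              foldl_pvStep_keep key t x hz]
      · simp [pvPick, hlt, hz, List.foldl_cons, pvStep, ih x]
    · simp [pvPick, hlt, List.foldl_cons, pvStep, ih m]

-- the whole early-exit pass computes min? when the initial bound exceeds every key
theorem pvPick_eq_min? (key : String → Nat) (n : Nat) (hk : ∀ x, key x ≤ n)
    (xs : List String) : pvPick key xs none (n + 1) = PySem.List.min? xs key := by
  cases xs with
  | nil => rfl
  | cons x t =>
    have hx : key x < n + 1 := by have := hk x; omega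
    rw [min?_eq_foldl_pvStep]
    by_cases hz : key x = 0
    · simp [pvPick, hx, hz, List.foldl_cons, pvStep,
            foldl_pvStep_keep key t x hz]
    · simp [pvPick, hx, hz, List.foldl_cons, pvStep, pvPick_eq_foldl key t x]

-- the core equivalence: A's nested loop (with fallback) = B's min-by-score
theorem main_eq (models : List String) (kws : List String) :
    (match pvLoopA models kws with
     | some m => some m
     | none => models.head?)
      = PySem.List.min? models (fun m => pvScore kws (PySem.Str.lower m)) := by
  induction kws with
  | nil =>
    simp only [pvLoopA]
    rw [show (fun m => pvScore [] (PySem.Str.lower m)) = (fun _ => (0 : Nat)) from rfl]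
    rw [min?_const_zero]
  | cons kw rest ih =>
    have hpred : (fun m => PySem.Str.isIn kw (PySem.Str.lower m))
        = (fun m => ((pvScore (kw :: rest) (PySem.Str.lower m) == 0) : Bool)) := by
      funext m; rw [score_cons_zero_iff]
    cases hfind : models.find? (fun m => PySem.Str.isIn kw (PySem.Str.lower m)) with
    | some m =>
      have : models.find?
          (fun x => pvScore (kw :: rest) (PySem.Str.lower x) == 0) = some m := by
        rw [← hpred]; exact hfind
      rw [min?_first_zero _ models m this]
      simp only [pvLoopA, hfind]
    | none =>
      have hall : ∀ x ∈ models,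
          PySem.Chars.isIn kw.toList (PySem.Chars.lower x.toList) = false := by
        intro x hx
        have := List.find?_eq_none.mp hfind x hx
        simpa using this
      have hkey : ∀ x ∈ models,
          pvScore (kw :: rest) (PySem.Str.lower x)
            = 1 + pvScore rest (PySem.Str.lower x) := by
        intro x hx; simp [pvScore, hall x hx]
      rw [min?_congr_mem _ (fun x => 1 + pvScore rest (PySem.Str.lower x)) models hkey,
          min?_shift]
      simp only [pvLoopA, hfind]
      exact ih

-- ===== VERDICT (by name: the statement is the Claim_ definition above) =====
theorem get_preferred_model_spec : Claim_equal_get_preferred_model := by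
  intro models kws? _
  unfold Spec_get_preferred_model get_preferred_model get_preferred_model_alt
  by_cases h : models.isEmpty
  · simp [h]
  · simp only [h, if_false]
    rw [pvPick_eq_min? _ _ (fun x => pvScore_le _ _) models]
    exact main_eq models _
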